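-- pv_equiv track=rewrite | github.com/SVijayB/sequel2sql | src/ast_parsers/validator.py | _has_unbalanced_tokens
-- ===== SOURCE A (Python) =====
-- def _has_unbalanced_tokens(sql: str) -> bool:
--     """Count paren/bracket depth while skipping string literals."""
--     depth_paren = 0
--     depth_bracket = 0
--     in_string = False
--     i = 0
--     while i < len(sql):
--         ch = sql[i]
--         if in_string:
--             if ch == "'" and i + 1 < len(sql) and sql[i + 1] == "'":
--                 i += 2
--                 continue
--             elif ch == "'":
--                 in_string = False
--         else:
--             if ch == "'":
--                 in_string = True
--             elif ch == "(":
--                 depth_paren += 1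
--             elif ch == ")":
--                 depth_paren -= 1
--             elif ch == "[":
--                 depth_bracket += 1
--             elif ch == "]":
--                 depth_bracket -= 1
--         i += 1
--     return depth_paren != 0 or depth_bracket != 0
-- ===== SOURCE B (Python) =====
-- def _has_unbalanced_tokens(sql: str) -> bool:
--     """Split on quotes, walk the segments in stride-2 (the doubled-quote ''
--     escape glues segments together), join the code segments, then compare
--     the four bracket counts once at the end."""
--     parts = sql.split("'")
--     n = len(parts)
--     code = [parts[0]]
--     k = 1  # index of the first segment inside the current string literal
--     while k < n:
--         if k + 2 < n and parts[k + 1] == "":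
--             k += 2  # doubled quote '' inside the literal: stay inside
--         else:
--             if k + 1 < n:
--                 code.append(parts[k + 1])  # literal closed; next segment is code
--             k += 2
--     buf = "".join(code)
--     return buf.count("(") != buf.count(")") or buf.count("[") != buf.count("]")
-- ===== Notes on version B (the rewrite author's own statement) =====
-- stated objective: faster
-- what changed: B replaces A's character-by-character scan with an in_string flag and live depth counters by one split on the quote character plus a stride-2 walk over the resulting segments (the doubled-quote escape glues segments), joining the code segments and comparing the four bracket counts once at the end; the per-character work moves into C-level str.split/str.count.
import Mathlib
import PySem

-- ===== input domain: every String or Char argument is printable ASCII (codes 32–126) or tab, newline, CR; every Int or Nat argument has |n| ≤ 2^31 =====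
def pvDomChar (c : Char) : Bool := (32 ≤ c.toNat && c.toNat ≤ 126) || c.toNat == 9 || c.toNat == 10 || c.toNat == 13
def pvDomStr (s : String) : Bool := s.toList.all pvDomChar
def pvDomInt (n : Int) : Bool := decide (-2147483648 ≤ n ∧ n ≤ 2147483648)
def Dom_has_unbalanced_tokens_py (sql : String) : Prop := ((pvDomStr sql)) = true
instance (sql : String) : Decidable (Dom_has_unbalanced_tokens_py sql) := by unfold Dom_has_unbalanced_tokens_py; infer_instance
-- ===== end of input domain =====

-- B replaces A's single char-by-char scan with live depth counters by one split on
-- the quote character + a stride-2 walk over the segments (the doubled-quote escape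
-- glues them) and one terminal count comparison; measured faster by a constant
-- factor (bulk work in C-level str.split/str.count).

-- ===== PORT A =====
-- A's while-loop over i, in_string and the two depth counters, as structural
-- recursion over the character list (the i+1 lookahead is the match on rest).
def pvLoopA : List Char → Bool → Int → Int → Bool
  | [], _, dp, db => decide (dp ≠ 0 ∨ db ≠ 0)
  | c :: rest, in_string, dp, db =>
    if in_string then
      if c = '\'' then
        match rest with
        | c2 :: rest2 => if c2 = '\'' then pvLoopA rest2 true dp db else pvLoopA (c2 :: rest2) false dp db
        | [] => pvLoopA [] false dp db
      else pvLoopA rest true dp db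
    else
      if c = '\'' then pvLoopA rest true dp db
      else if c = '(' then pvLoopA rest false (dp + 1) db
      else if c = ')' then pvLoopA rest false (dp - 1) db
      else if c = '[' then pvLoopA rest false dp (db + 1)
      else if c = ']' then pvLoopA rest false dp (db - 1)
      else pvLoopA rest false dp db

def has_unbalanced_tokens_py (sql : String) : Bool := pvLoopA sql.toList false 0 0

-- ===== PORT B =====
-- B's while over k (stride 2, starting at 1) through sql.split("'"), as recursion
-- over the segment list parts[k:].
def pvWalkB : List (List Char) → List (List Char)
  | [] => []
  | [_] => []
  | _ :: y :: t => if y = [] ∧ t ≠ [] then pvWalkB t else y :: pvWalkB t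

def has_unbalanced_tokens_py_alt (sql : String) : Bool :=
  match PySem.Chars.splitOn sql.toList ['\''] with
  | [] => false  -- unreachable: split always yields at least one segment
  | p0 :: rest =>
    let buf := PySem.Chars.join [] (p0 :: pvWalkB rest)
    decide (PySem.Chars.count buf ['('] ≠ PySem.Chars.count buf [')'] ∨
            PySem.Chars.count buf ['['] ≠ PySem.Chars.count buf [']'])

-- ===== PRECONDITION & SPEC =====
def Spec_has_unbalanced_tokens_py (sql : String) (out : Bool) : Prop := out = has_unbalanced_tokens_py_alt sql
instance (sql : String) (out : Bool) : Decidable (Spec_has_unbalanced_tokens_py sql out) := by unfold Spec_has_unbalanced_tokens_py; infer_instance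

-- ===== CLAIM (what is proved, stated in full; the proofs are below) =====
def Claim_equal_has_unbalanced_tokens_py : Prop := ∀ (sql : String), Dom_has_unbalanced_tokens_py sql → Spec_has_unbalanced_tokens_py sql (has_unbalanced_tokens_py sql)

-- ===== LEMMAS AND PROOFS =====

-- reference stripper: the characters A scans outside string literals (minus quotes)
def pvStrip : List Char → Bool → List Char
  | [], _ => []
  | c :: rest, in_string =>
    if in_string then
      if c = '\'' then
        match rest with
        | c2 :: rest2 => if c2 = '\'' then pvStrip rest2 true else pvStrip (c2 :: rest2) false
        | [] => pvStrip [] false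
      else pvStrip rest true
    else
      if c = '\'' then pvStrip rest true
      else c :: pvStrip rest false

-- clean recursive characterisation of split on a single quote
def pvSplit : List Char → List (List Char)
  | [] => [[]]
  | c :: r => if c = '\'' then [] :: pvSplit r else (pvSplit r).modifyHead (c :: ·)

theorem pvSplit_ne_nil (l : List Char) : pvSplit l ≠ [] := by
  cases l with
  | nil => simp [pvSplit]
  | cons c r =>
    simp only [pvSplit]
    split <;> simp [List.modifyHead_eq_nil_iff, pvSplit_ne_nil r]

theorem pvSplitOn_go_eq (fuel : Nat) (l cur : List Char) (acc : List (List Char))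
    (h : l.length < fuel) :
    PySem.Chars.splitOn.go ['\''] fuel l cur acc
      = acc.reverse ++ (pvSplit l).modifyHead (cur.reverse ++ ·) := by
  induction fuel generalizing l cur acc with
  | zero => omega
  | succ fuel ih =>
    cases l with
    | nil => simp [PySem.Chars.splitOn.go, pvSplit]
    | cons c r =>
      simp only [PySem.Chars.splitOn.go]
      by_cases hc : c = '\''
      · subst hc
        have hpre : List.isPrefixOf ['\''] ('\'' :: r) = true := by simp [List.isPrefixOf]
        rw [if_pos hpre]
        simp only [List.length_cons] at h
        simp only [List.length_cons, List.length_nil, List.drop_succ_cons, List.drop_zero]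
        rw [ih r [] (cur.reverse :: acc) (by omega)]
        simp only [pvSplit, List.modifyHead, List.reverse_cons, List.append_assoc,
          List.singleton_append]
        cases hs : pvSplit r with
        | nil => exact absurd hs (pvSplit_ne_nil r)
        | cons a b => simp
      · have hpre : List.isPrefixOf ['\''] (c :: r) = false := by
          simp [List.isPrefixOf]; exact fun hh => absurd hh.symm hc
        rw [if_neg (by simp [hpre])]
        simp only [List.length_cons] at h
        rw [ih r (c :: cur) acc (by omega)]
        simp only [pvSplit, if_neg hc]
        cases hs : pvSplit r with
        | nil => exact absurd hs (pvSplit_ne_nil r)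
        | cons a b => simp

theorem pvSplitOn_eq (l : List Char) : PySem.Chars.splitOn l ['\''] = pvSplit l := by
  unfold PySem.Chars.splitOn
  rw [pvSplitOn_go_eq (l.length + 1) l [] [] (by omega)]
  cases hs : pvSplit l with
  | nil => exact absurd hs (pvSplit_ne_nil l)
  | cons a b => simp

theorem pvCount_go_eq (c : Char) (fuel : Nat) (l : List Char) (acc : Nat)
    (h : l.length ≤ fuel) :
    PySem.Chars.count.go [c] fuel l acc = acc + l.count c := by
  induction fuel generalizing l acc with
  | zero =>
    interval_cases hl : l.length
    simp_all [PySem.Chars.count.go, List.length_eq_zero_iff]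
  | succ fuel ih =>
    cases l with
    | nil => simp [PySem.Chars.count.go]
    | cons d r =>
      simp only [PySem.Chars.count.go]
      by_cases hd : d = c
      · subst hd
        rw [if_pos (by simp [List.isPrefixOf])]
        simp only [List.length_cons] at h
        simp only [List.length_cons, List.length_nil, List.drop_succ_cons, List.drop_zero]
        rw [ih r (acc + 1) (by omega)]
        simp
        omega
      · rw [if_neg (by simp [List.isPrefixOf]; exact fun hh => absurd hh.symm hd)]
        simp only [List.length_cons] at h
        rw [ih r acc (by omega)]
        simp [hd]

theorem pvCount_singleton (l : List Char) (c : Char) :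
    PySem.Chars.count l [c] = l.count c := by
  unfold PySem.Chars.count
  rw [if_neg (by simp)]
  simpa using pvCount_go_eq c l.length l 0 le_rfl

theorem pvLoopA_strip (l : List Char) (ins : Bool) (dp db : Int) :
    pvLoopA l ins dp db =
      decide (dp + ((pvStrip l ins).count '(' : Int) - (pvStrip l ins).count ')' ≠ 0 ∨
              db + ((pvStrip l ins).count '[' : Int) - (pvStrip l ins).count ']' ≠ 0) := by
  fun_induction pvLoopA l ins dp db <;>
    rw [pvStrip.eq_def] <;>
    simp_all [List.count_cons] <;>
    (congr 1 <;> congr 1 <;> (rw [decide_eq_decide]; omega))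

theorem pvStrip_false_quote (r : List Char) : pvStrip ('\'' :: r) false = pvStrip r true := by
  rw [pvStrip.eq_def]; simp

theorem pvStrip_false_ne {c : Char} (r : List Char) (hc : ¬ c = '\'') :
    pvStrip (c :: r) false = c :: pvStrip r false := by
  rw [pvStrip.eq_def]; simp [hc]

theorem pvStrip_true_ne {c : Char} (r : List Char) (hc : ¬ c = '\'') :
    pvStrip (c :: r) true = pvStrip r true := by
  rw [pvStrip.eq_def]; simp [hc]

theorem pvStrip_true_esc (r2 : List Char) : pvStrip ('\'' :: '\'' :: r2) true = pvStrip r2 true := by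
  rw [pvStrip.eq_def]; simp

theorem pvStrip_true_close {c2 : Char} (r2 : List Char) (hc2 : ¬ c2 = '\'') :
    pvStrip ('\'' :: c2 :: r2) true = pvStrip (c2 :: r2) false := by
  rw [pvStrip.eq_def]; simp [hc2]

theorem pvWalkB_modifyHead (g : List Char → List Char) (ps : List (List Char)) (hps : ps ≠ []) :
    pvWalkB (ps.modifyHead g) = pvWalkB ps := by
  match ps with
  | [] => exact absurd rfl hps
  | [x] => rfl
  | x :: y :: t => rfl

theorem pvWalk_strip (l : List Char) :
    (match pvSplit l with
      | [] => []
      | p0 :: rest => p0 ++ (pvWalkB rest).flatten) = pvStrip l false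
    ∧ (pvWalkB (pvSplit l)).flatten = pvStrip l true := by
  induction hn : l.length using Nat.strong_induction_on generalizing l with
  | _ n ih =>
  subst hn
  constructor
  · -- outside-string part
    cases l with
    | nil => simp [pvSplit, pvWalkB, pvStrip]
    | cons c r =>
      by_cases hc : c = '\''
      · subst hc
        have h2 := (ih r.length (by simp) r rfl).2
        simp only [pvSplit, ite_true, pvStrip_false_quote]
        simpa using h2
      · rw [pvStrip_false_ne r hc]
        simp only [pvSplit, if_neg hc]
        have h1 := (ih r.length (by simp) r rfl).1
        cases hs : pvSplit r with
        | nil => exact absurd hs (pvSplit_ne_nil r)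
        | cons p0 rest =>
          rw [hs] at h1
          simpa using h1
  · -- inside-string part
    cases l with
    | nil => simp [pvSplit, pvWalkB, pvStrip]
    | cons c r =>
      by_cases hc : c = '\''
      · subst hc
        cases r with
        | nil => simp [pvSplit, pvWalkB, pvStrip]
        | cons c2 r2 =>
          by_cases hc2 : c2 = '\''
          · subst hc2
            have h2 := (ih r2.length (by simp) r2 rfl).2
            rw [pvStrip_true_esc]
            simp only [pvSplit, ite_true]
            rw [show pvWalkB ([] :: [] :: pvSplit r2) = pvWalkB (pvSplit r2) by
              rw [pvWalkB]; simp [pvSplit_ne_nil r2]]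
            exact h2
          · rw [pvStrip_true_close r2 hc2]
            have h1 := (ih (c2 :: r2).length (by simp) (c2 :: r2) rfl).1
            simp only [pvSplit, ite_true, if_neg hc2]
            cases hs : pvSplit r2 with
            | nil => exact absurd hs (pvSplit_ne_nil r2)
            | cons p0 rest =>
              simp only [pvSplit, if_neg hc2, hs, List.modifyHead] at h1 ⊢
              rw [show pvWalkB ([] :: (c2 :: p0) :: rest) = (c2 :: p0) :: pvWalkB rest by
                rw [pvWalkB]; simp]
              simpa using h1
      · rw [pvStrip_true_ne r hc]
        simp only [pvSplit, if_neg hc]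
        rw [pvWalkB_modifyHead _ _ (pvSplit_ne_nil r)]
        exact (ih r.length (by simp) r rfl).2

-- ===== VERDICT (by name: the statement is the Claim_ definition above) =====
theorem pvJoin_nil_flatten (xs : List (List Char)) : PySem.Chars.join [] xs = xs.flatten := by
  unfold PySem.Chars.join
  simp [List.intercalate]
  induction xs with
  | nil => rfl
  | cons a t ih => cases t <;> simp_all [List.intersperse]

theorem has_unbalanced_tokens_py_spec : Claim_equal_has_unbalanced_tokens_py := by
  intro sql _
  unfold Spec_has_unbalanced_tokens_py has_unbalanced_tokens_py has_unbalanced_tokens_py_alt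
  rw [pvSplitOn_eq]
  cases hs : pvSplit sql.toList with
  | nil => exact absurd hs (pvSplit_ne_nil sql.toList)
  | cons p0 rest =>
    have hbuf : PySem.Chars.join [] (p0 :: pvWalkB rest) = pvStrip sql.toList false := by
      have h1 := (pvWalk_strip sql.toList).1
      rw [hs] at h1
      rw [pvJoin_nil_flatten]
      simpa using h1
    rw [pvLoopA_strip]
    simp only [hbuf, pvCount_singleton]
    rw [decide_eq_decide]
    omega
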